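-- pv_equiv track=rewrite | github.com/Fraunhofer-SCAI/conv_sr_mesh_autoencoder | mesh/mesh_tools.py | sort_connected_vertices
-- ===== SOURCE A (Python) =====
-- def sort_connected_vertices(list_vv, edges):
--     # input
--     # - list_vv: list of the vertex indices that form a circle
--     # - edges: list of tuples, that indicate the edges between two vertices
--     # output:
--     # - list_vv_sorted: sorted list_vv
--     list_vv_sorted = [list_vv[0]]
--     list_vv.remove(list_vv[0])
--     nn = len(list_vv)
--     for jj in range(nn):
--         for ee in edges:
--             if list_vv_sorted[-1] == ee[0]:
--                 if ee[1] in list_vv: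
--                     list_vv_sorted += [ee[1]]
--                     list_vv.remove(ee[1])
--                     break
--             if list_vv_sorted[-1] == ee[1]:
--                 if ee[0] in list_vv:
--                     list_vv_sorted += [ee[0]]
--                     list_vv.remove(ee[0])
--                     break
--     return list_vv_sorted
-- ===== SOURCE B (Python) =====
-- def sort_connected_vertices(list_vv, edges):
--     # Follow the circle in one pass over precomputed edge-ordered adjacency
--     # lists with a multiplicity dict of the not-yet-placed vertices.
--     # (Return value only: unlike A, this does not mutate list_vv.)
--     adj = {}
--     for u, v in edges:
--         if u in adj:
--             adj[u].append(v)
--         else: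
--             adj[u] = [v]
--         if v in adj:
--             adj[v].append(u)
--         else:
--             adj[v] = [u]
--     count = {}
--     for w in list_vv[1:]:
--         count[w] = count.get(w, 0) + 1
--     out = [list_vv[0]]
--     last = list_vv[0]
--     for _ in range(len(list_vv) - 1):
--         nxt = None
--         for w in adj.get(last, []):
--             if count.get(w, 0) > 0:
--                 nxt = w
--                 break
--         if nxt is None:
--             break
--         count[nxt] -= 1
--         out.append(nxt)
--         last = nxt
--     return out
-- ===== Notes on version B (the rewrite author's own statement) =====
-- stated objective: faster
-- what changed: Instead of rescanning the whole edge list at every step and doing O(n) 'in'/remove on the remaining-vertex list, B precomputes edge-ordered adjacency lists and a multiplicity dict of unplaced vertices once, then follows the path in one pass.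
import Mathlib
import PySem

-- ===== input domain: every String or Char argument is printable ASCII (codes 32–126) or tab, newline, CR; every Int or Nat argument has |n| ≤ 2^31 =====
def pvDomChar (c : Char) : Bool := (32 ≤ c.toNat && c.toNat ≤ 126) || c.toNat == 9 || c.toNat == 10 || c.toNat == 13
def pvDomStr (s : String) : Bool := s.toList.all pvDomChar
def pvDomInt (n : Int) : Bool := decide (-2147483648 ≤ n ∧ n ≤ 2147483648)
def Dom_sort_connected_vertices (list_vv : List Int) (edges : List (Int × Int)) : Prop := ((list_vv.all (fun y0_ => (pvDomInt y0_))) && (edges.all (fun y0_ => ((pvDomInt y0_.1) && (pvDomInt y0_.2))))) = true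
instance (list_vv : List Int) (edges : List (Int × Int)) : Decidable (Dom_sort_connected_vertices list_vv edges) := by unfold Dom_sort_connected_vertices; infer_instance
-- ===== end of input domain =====

-- B replaces A's per-step rescan of `edges` (with O(n) list membership/remove) by
-- precomputed edge-ordered adjacency lists plus a multiplicity dict, following the
-- path in one pass.  A mutates its argument list_vv in place, B does not; the
-- equivalence proved here is about the return value only.

-- ===== PORT A =====
-- inner `for ee in edges` loop with its two if/break branches; `list.remove` on a
-- guaranteed member is `List.erase` (first occurrence, exact)
def pvInnerA (last : Int) (rem : List Int) : List (Int × Int) → Option (Int × List Int)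
  | [] => none
  | ee :: rest =>
    if last = ee.1 ∧ ee.2 ∈ rem then some (ee.2, rem.erase ee.2)
    else if last = ee.2 ∧ ee.1 ∈ rem then some (ee.1, rem.erase ee.1)
    else pvInnerA last rem rest

-- outer `for jj in range(nn)` loop; `list_vv_sorted[-1]` via pyGetD (sorted is never empty)
def pvLoopA (edges : List (Int × Int)) : Nat → List Int → List Int → List Int
  | 0, sorted, _ => sorted
  | n + 1, sorted, rem =>
    match pvInnerA (PySem.List.pyGetD sorted (-1) 0) rem edges with
    | some (v, rem') => pvLoopA edges n (sorted ++ [v]) rem'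
    | none => pvLoopA edges n sorted rem

def sort_connected_vertices (list_vv : List Int) (edges : List (Int × Int)) : List Int :=
  match list_vv with
  | [] => []  -- Python raises IndexError on list_vv[0]; excluded by Pre_
  | v0 :: rest => pvLoopA edges rest.length [v0] rest  -- list_vv.remove(list_vv[0]) drops the head

-- ===== PORT B =====
-- `adj` built over edges; `if u in adj: adj[u].append(v) else: adj[u] = [v]` is
-- insert of (previous value, [] if absent) ++ [v]
def pvAdj (edges : List (Int × Int)) : PySem.Dict Int (List Int) :=
  edges.foldl (fun d e =>
    let d1 := d.insert e.1 (d.getD e.1 [] ++ [e.2])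
    d1.insert e.2 (d1.getD e.2 [] ++ [e.1])) PySem.Dict.empty

-- inner `for w in adj.get(last, [])` scan with break
def pvFirstNb (count : PySem.Dict Int Int) : List Int → Option Int
  | [] => none
  | w :: ws => if count.getD w 0 > 0 then some w else pvFirstNb count ws

-- `for _ in range(len(list_vv) - 1)` loop with its `break`
def pvLoopB (adj : PySem.Dict Int (List Int)) : Nat → PySem.Dict Int Int → List Int → Int → List Int
  | 0, _, out, _ => out
  | n + 1, count, out, last =>
    match pvFirstNb count (adj.getD last []) with
    | none => out
    | some w => pvLoopB adj n (count.insert w (count.getD w 0 - 1)) (out ++ [w]) w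

def sort_connected_vertices_alt (list_vv : List Int) (edges : List (Int × Int)) : List Int :=
  match list_vv with
  | [] => []  -- Python raises IndexError on list_vv[0]; excluded by Pre_
  | v0 :: rest =>
    pvLoopB (pvAdj edges) rest.length
      (rest.foldl (fun d w => d.insert w (d.getD w 0 + 1)) PySem.Dict.empty) [v0] v0

-- ===== PRECONDITION & SPEC =====
-- Pre_ excludes exactly the empty list_vv, on which both Pythons raise IndexError at list_vv[0].
def Pre_sort_connected_vertices (list_vv : List Int) (edges : List (Int × Int)) : Prop :=
  list_vv ≠ []
instance (list_vv : List Int) (edges : List (Int × Int)) : Decidable (Pre_sort_connected_vertices list_vv edges) := by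
  unfold Pre_sort_connected_vertices; infer_instance

def pvWitness_sort_connected_vertices : List Int × (List (Int × Int)) :=
  ([1, 2, 3], [(1, 2), (2, 3)])

def Spec_sort_connected_vertices (list_vv : List Int) (edges : List (Int × Int)) (out : List Int) : Prop := out = sort_connected_vertices_alt list_vv edges
instance (list_vv : List Int) (edges : List (Int × Int)) (out : List Int) : Decidable (Spec_sort_connected_vertices list_vv edges out) := by unfold Spec_sort_connected_vertices; infer_instance

-- ===== CLAIM (what is proved, stated in full; the proofs are below) =====
def Claim_equal_sort_connected_vertices : Prop := ∀ (list_vv : List Int) (edges : List (Int × Int)), Dom_sort_connected_vertices list_vv edges → Pre_sort_connected_vertices list_vv edges → Spec_sort_connected_vertices list_vv edges (sort_connected_vertices list_vv edges)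

-- ===== LEMMAS AND PROOFS =====

-- the edge-ordered neighbour list of x, as A scans it
def pvNbs (x : Int) (edges : List (Int × Int)) : List Int :=
  edges.flatMap (fun e => (if e.1 = x then [e.2] else []) ++ (if e.2 = x then [e.1] else []))

theorem pvAdj_getD_aux (x : Int) (edges : List (Int × Int)) :
    ∀ d : PySem.Dict Int (List Int),
    (edges.foldl (fun d e =>
      let d1 := d.insert e.1 (d.getD e.1 [] ++ [e.2])
      d1.insert e.2 (d1.getD e.2 [] ++ [e.1])) d).getD x []
    = d.getD x [] ++ pvNbs x edges := by
  induction edges with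
  | nil => intro d; simp [pvNbs]
  | cons e es ih =>
    intro d
    simp only [List.foldl_cons]
    rw [ih]
    simp only [PySem.Dict.getD_insert, pvNbs, List.flatMap_cons]
    by_cases h1 : x = e.2 <;> by_cases h2 : x = e.1 <;>
      simp_all [eq_comm, List.append_assoc]

theorem pvAdj_getD (edges : List (Int × Int)) (x : Int) :
    (pvAdj edges).getD x [] = pvNbs x edges := by
  unfold pvAdj
  rw [pvAdj_getD_aux]
  simp [PySem.Dict.getD_empty]

-- Rel: the count dict tracks the multiset of remaining vertices
def pvRel (count : PySem.Dict Int Int) (rem : List Int) : Prop :=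
  ∀ v : Int, count.getD v 0 = (rem.count v : Int)

theorem pvFirstNb_some (count : PySem.Dict Int Int) (l : List Int) (w : Int)
    (h : pvFirstNb count l = some w) : count.getD w 0 > 0 := by
  induction l with
  | nil => simp [pvFirstNb] at h
  | cons y ys ih =>
    by_cases hy : count.getD y 0 > 0
    · simp [pvFirstNb, hy] at h; subst h; exact hy
    · simp [pvFirstNb, hy] at h; exact ih h

theorem pvInnerA_eq (last : Int) (rem : List Int) (count : PySem.Dict Int Int)
    (hrel : pvRel count rem) (edges : List (Int × Int)) :
    pvInnerA last rem edges = (pvFirstNb count (pvNbs last edges)).map (fun w => (w, rem.erase w)) := by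
  have hmem : ∀ w : Int, (count.getD w 0 > 0) ↔ w ∈ rem := by
    intro w
    rw [hrel w]
    exact_mod_cast List.count_pos_iff
  induction edges with
  | nil => simp [pvInnerA, pvNbs, pvFirstNb]
  | cons e es ih =>
    simp only [pvInnerA, pvNbs, List.flatMap_cons, List.append_assoc]
    by_cases h1 : e.1 = last <;> by_cases h2 : e.2 = last <;>
      by_cases m2 : e.2 ∈ rem <;> by_cases m1 : e.1 ∈ rem <;>
        simp_all [pvFirstNb, hmem, pvNbs, eq_comm]

theorem pvLoopA_none (edges : List (Int × Int)) (n : Nat) (sorted rem : List Int)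
    (h : pvInnerA (PySem.List.pyGetD sorted (-1) 0) rem edges = none) :
    pvLoopA edges n sorted rem = sorted := by
  induction n with
  | zero => rfl
  | succ k ih => simp [pvLoopA, h, ih]

theorem pvLoop_eq (edges : List (Int × Int)) (n : Nat) :
    ∀ (out : List Int) (last : Int) (count : PySem.Dict Int Int) (rem : List Int),
    PySem.List.pyGetD out (-1) 0 = last → pvRel count rem →
    pvLoopA edges n out rem = pvLoopB (pvAdj edges) n count out last := by
  induction n with
  | zero => intro out last count rem _ _; rfl
  | succ k ih =>
    intro out last count rem hlast hrel
    simp only [pvLoopA, pvLoopB, hlast, pvAdj_getD, pvInnerA_eq last rem count hrel]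
    cases hfb : pvFirstNb count (pvNbs last edges) with
    | none =>
      simp only [Option.map_none]
      exact pvLoopA_none edges k out rem (by rw [hlast, pvInnerA_eq last rem count hrel, hfb]; rfl)
    | some w =>
      simp only [Option.map_some]
      have hwpos : count.getD w 0 > 0 := pvFirstNb_some count _ w hfb
      have hwmem : w ∈ rem := by
        have := hrel w
        rw [this] at hwpos
        exact List.count_pos_iff.mp (by exact_mod_cast hwpos)
      apply ih
      · exact PySem.List.pyGetD_neg_one_append_singleton out w 0
      · intro v
        rw [PySem.Dict.getD_insert]
        by_cases hv : v = w
        · subst hv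
          rw [if_pos rfl, hrel v, List.count_erase_self]
          have : 1 ≤ rem.count v := List.count_pos_iff.mpr hwmem
          push_cast [Nat.cast_sub this]
          ring
        · rw [if_neg hv, hrel v, List.count_erase_of_ne hv]

-- ===== VERDICT (by name: the statement is the Claim_ definition above) =====
theorem sort_connected_vertices_spec : Claim_equal_sort_connected_vertices := by
  intro list_vv edges _ hpre
  unfold Spec_sort_connected_vertices
  match list_vv with
  | [] => exact absurd rfl hpre
  | v0 :: rest =>
    simp only [sort_connected_vertices, sort_connected_vertices_alt]
    apply pvLoop_eq
    · simp [PySem.List.pyGetD, PySem.List.pyGet?, PySem.List.pyIdx?]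
    · intro v
      rw [PySem.Dict.getD_foldl_insert_add_one]
      simp [PySem.Dict.getD_empty]
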